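-- pv_equiv track=rewrite | github.com/Pandabug/Homeworks | University/Python/HW6-req/prova_code.py | find_diagonal
-- ===== SOURCE A (Python) =====
-- def find_diagonal(commands):
-- 	wrong_list : list[str]  							= [
-- 		'NW E SW',
-- 		'SW E NW',
-- 		'NE W SE',
-- 		'SE W NE',
-- 		'SW N SE',
-- 		'SE N SW',
-- 		'NW S NE',
-- 		'NE S NW',
-- 		]
--
--
-- 	try:
-- 		return min(commands.index(x) for x in wrong_list if x in commands), True
-- 	except:
-- 		return len(commands) - 4, False
-- ===== SOURCE B (Python) =====
-- def find_diagonal(commands):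
--     wrong = frozenset([
--         'NW E SW',
--         'SW E NW',
--         'NE W SE',
--         'SE W NE',
--         'SW N SE',
--         'SE N SW',
--         'NW S NE',
--         'NE S NW',
--     ])
--     idx = next((i for i, x in enumerate(commands) if x in wrong), None)
--     if idx is not None:
--         return idx, True
--     return len(commands) - 4, False
-- ===== Notes on version B (the rewrite author's own statement) =====
-- stated objective: simpler
-- what changed: Replaces eight separate membership+index scans over the list (plus min over the found indices) with a single left-to-right pass that returns the index of the first element found in a frozenset of the 8 patterns.
import Mathlib
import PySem

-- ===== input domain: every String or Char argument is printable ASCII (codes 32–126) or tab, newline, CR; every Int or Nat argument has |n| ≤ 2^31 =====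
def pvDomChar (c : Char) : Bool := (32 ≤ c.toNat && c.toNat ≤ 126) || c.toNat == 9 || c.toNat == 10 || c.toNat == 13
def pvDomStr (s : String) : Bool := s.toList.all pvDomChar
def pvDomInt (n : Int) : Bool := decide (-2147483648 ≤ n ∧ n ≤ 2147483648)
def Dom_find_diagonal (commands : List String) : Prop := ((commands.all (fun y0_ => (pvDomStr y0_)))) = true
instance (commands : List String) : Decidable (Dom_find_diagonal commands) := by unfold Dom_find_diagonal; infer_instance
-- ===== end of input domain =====

-- B replaces A's eight membership+index scans (and the min over them) with one
-- left-to-right pass returning the first position holding a forbidden pattern (objective: simpler).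

def pvWrongList : List String :=
  ["NW E SW", "SW E NW", "NE W SE", "SE W NE", "SW N SE", "SE N SW", "NW S NE", "NE S NW"]

-- ===== PORT A =====
-- min(commands.index(x) for x in wrong_list if x in commands): the .getD 0 is only
-- reached under the filter guard x ∈ commands, where index? is some (exact there).
def find_diagonal (commands : List String) : Int × Bool :=
  match PySem.List.min?
      ((pvWrongList.filter (fun x => commands.contains x)).map
        (fun x => (PySem.List.index? commands x).getD 0)) (fun y => y) with
  | some m => ((m : Int), true)
  | none => ((commands.length : Int) - 4, false)

-- ===== PORT B =====
-- next((i for i, x in enumerate(commands) if x in wrong), None)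
def pvFirstWrong : List String → Nat → Option Nat
  | [], _ => none
  | x :: rest, i => if pvWrongList.contains x then some i else pvFirstWrong rest (i + 1)

def find_diagonal_alt (commands : List String) : Int × Bool :=
  match pvFirstWrong commands 0 with
  | some i => ((i : Int), true)
  | none => ((commands.length : Int) - 4, false)

-- ===== PRECONDITION & SPEC =====
def Spec_find_diagonal (commands : List String) (out : Int × Bool) : Prop := out = find_diagonal_alt commands
instance (commands : List String) (out : Int × Bool) : Decidable (Spec_find_diagonal commands out) := by unfold Spec_find_diagonal; infer_instance

-- ===== CLAIM (what is proved, stated in full; the proofs are below) =====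
def Claim_equal_find_diagonal : Prop := ∀ (commands : List String), Dom_find_diagonal commands → Spec_find_diagonal commands (find_diagonal commands)

-- ===== LEMMAS AND PROOFS =====

theorem pvFirstWrong_shift (xs : List String) (i : Nat) :
    pvFirstWrong xs i = (pvFirstWrong xs 0).map (· + i) := by
  induction xs generalizing i with
  | nil => simp [pvFirstWrong]
  | cons a r ih =>
    simp only [pvFirstWrong]
    by_cases h : pvWrongList.contains a = true
    · have h' : a ∈ pvWrongList := by simpa using h
      simp [h']
    · have h' : pvWrongList.contains a = false := by simpa using h
      simp only [h', Bool.false_eq_true, if_false]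
      rw [ih (i + 1), ih 1]
      cases pvFirstWrong r 0 with
      | none => simp
      | some v => simp; omega

theorem foldl_min_map_succ (t : List Nat) (a : Nat) :
    (t.map (· + 1)).foldl min (a + 1) = t.foldl min a + 1 := by
  induction t generalizing a with
  | nil => simp
  | cons y u ih =>
    simp only [List.map_cons, List.foldl_cons]
    rw [show min (a + 1) (y + 1) = min a y + 1 by omega]
    exact ih (min a y)

theorem min?_id_map_succ (L : List Nat) :
    PySem.List.min? (L.map (· + 1)) (fun y => y) =
      (PySem.List.min? L (fun y => y)).map (· + 1) := by
  cases L with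
  | nil => simp [PySem.List.min?]
  | cons a t =>
    rw [List.map_cons, PySem.List.min?_id_cons, PySem.List.min?_id_cons]
    simp only [Option.map_some]
    rw [foldl_min_map_succ]

theorem min?_mem_zero (L : List Nat) (h : 0 ∈ L) :
    PySem.List.min? L (fun y => y) = some 0 := by
  have hne : L ≠ [] := by rintro rfl; simp at h
  cases hm : PySem.List.min? L (fun y => y) with
  | none => exact absurd ((PySem.List.min?_eq_none_iff _ _).mp hm) hne
  | some m =>
    have hle := PySem.List.min?_isMin hm 0 h
    simp at hle
    simp [hle]

-- main characterisation: A's min-of-indices equals B's first wrong position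
theorem min_idxs_eq_firstWrong (xs : List String) :
    PySem.List.min?
      ((pvWrongList.filter (fun x => xs.contains x)).map
        (fun x => (PySem.List.index? xs x).getD 0)) (fun y => y) =
    pvFirstWrong xs 0 := by
  induction xs with
  | nil => simp [pvFirstWrong, PySem.List.min?]
  | cons a r ih =>
    by_cases ha : pvWrongList.contains a
    · -- a is a forbidden pattern: 0 is among the mapped indices
      have h0 : (0 : Nat) ∈
          (pvWrongList.filter (fun x => (a :: r).contains x)).map
            (fun x => (PySem.List.index? (a :: r) x).getD 0) := by
        refine List.mem_map.mpr ⟨a, ?_, ?_⟩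
        · exact List.mem_filter.mpr ⟨by simpa using ha, by simp⟩
        · simp [PySem.List.index?_eq_idxOf?, List.idxOf?, List.findIdx?_cons]
      rw [min?_mem_zero _ h0]
      have ha' : a ∈ pvWrongList := by simpa using ha
      simp [pvFirstWrong, ha']
    · -- a is not forbidden: every filtered pattern is ≠ a, indices shift by one
      have hfilter :
          pvWrongList.filter (fun x => (a :: r).contains x) =
          pvWrongList.filter (fun x => r.contains x) := by
        refine List.filter_congr ?_
        intro x hx
        have hne : x ≠ a := by
          rintro rfl; exact ha (by simpa using hx)
        simp [hne]
      have hmap :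
          (pvWrongList.filter (fun x => r.contains x)).map
            (fun x => (PySem.List.index? (a :: r) x).getD 0) =
          ((pvWrongList.filter (fun x => r.contains x)).map
            (fun x => (PySem.List.index? r x).getD 0)).map (· + 1) := by
        rw [List.map_map]
        refine List.map_congr_left ?_
        intro x hx
        have hxr : x ∈ r := by
          have := (List.mem_filter.mp hx).2
          simpa using this
        have hne : a ≠ x := by
          rintro rfl; exact ha (by simpa using (List.mem_filter.mp hx).1)
        obtain ⟨k, hk⟩ := Option.isSome_iff_exists.mp
          ((PySem.List.index?_isSome_iff _ _).mpr hxr)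
        have hk' : List.idxOf? x r = some k := by
          rw [← PySem.List.index?_eq_idxOf?]; exact hk
        rw [PySem.List.index?_cons_of_ne r hne, hk]
        simp [Function.comp, hk']
      rw [hfilter, hmap, min?_id_map_succ, ih]
      have ha' : pvWrongList.contains a = false := by simpa using ha
      simp only [pvFirstWrong, ha', Bool.false_eq_true, if_false]
      rw [pvFirstWrong_shift r 1]

-- ===== VERDICT (by name: the statement is the Claim_ definition above) =====
theorem find_diagonal_spec : Claim_equal_find_diagonal := by
  intro commands _
  unfold Spec_find_diagonal find_diagonal find_diagonal_alt
  rw [min_idxs_eq_firstWrong]
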